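-- pv_equiv track=rewrite | github.com/chintanaprabhu/Google-Code-Jam-2021 | Qualification round/Moons and Umbrellas.py | calcPenalty
-- ===== SOURCE A (Python) =====
-- def calcPenalty(x, y, mural):
--     penalty = 0
--     if not mural:
--         return 0
--     prev = mural[0]
--     for i in range(1, len(mural)):
--         if mural[i] == '?':
--             mural[i] = prev
--         cr = prev+mural[i]
--         if cr == "CJ":
--             penalty += x
--         if cr == "JC":
--             penalty += y
--         prev = mural[i]
--     return penalty
-- ===== SOURCE B (Python) =====
-- def calcPenalty(x, y, mural):
--     # '?' entries resolve to their predecessor, so they never create a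
--     # penalized transition; drop them and count transitions among survivors.
--     kept = [s for s in mural if s != '?']
--     pairs = [a + b for a, b in zip(kept, kept[1:])]
--     return x * pairs.count("CJ") + y * pairs.count("JC")
-- ===== Notes on version B (the rewrite author's own statement) =====
-- stated objective: alternative
-- what changed: B never resolves '?' at all: since a '?' entry copies its predecessor it can never create a penalized transition, B drops every '?' entry, forms the adjacent-pair concatenations of the survivors, and returns x*count('CJ')+y*count('JC'), replacing A's stateful resolve-and-accumulate loop (and its in-place mutation of mural) with filter+count arithmetic.
import Mathlib
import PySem

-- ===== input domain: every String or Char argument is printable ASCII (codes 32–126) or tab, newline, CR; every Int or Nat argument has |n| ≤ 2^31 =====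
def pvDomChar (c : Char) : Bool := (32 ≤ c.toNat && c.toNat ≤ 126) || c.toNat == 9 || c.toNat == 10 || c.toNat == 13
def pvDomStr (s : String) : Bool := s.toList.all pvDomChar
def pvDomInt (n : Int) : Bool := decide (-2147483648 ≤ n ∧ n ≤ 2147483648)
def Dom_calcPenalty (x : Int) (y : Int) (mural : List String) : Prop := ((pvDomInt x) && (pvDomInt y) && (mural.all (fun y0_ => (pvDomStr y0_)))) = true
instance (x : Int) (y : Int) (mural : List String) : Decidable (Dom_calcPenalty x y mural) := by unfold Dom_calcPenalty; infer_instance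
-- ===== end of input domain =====

-- B drops '?' entries (which never create a penalized transition) and counts "CJ"/"JC" adjacent pairs instead of A's stateful resolve-and-accumulate loop (objective: alternative); A mutates mural in place, B does not — the equivalence is about the return value only.


-- ===== PORT A =====
-- A's single loop: prev accumulator, '?' resolved on the fly, penalty updated in the same step.
def calcPenaltyGo (x : Int) (y : Int) (prev : String) (rest : List String) (penalty : Int) : Int :=
  match rest with
  | [] => penalty
  | c :: t =>
    let c' := if c = "?" then prev else c
    let cr := prev ++ c'
    let penalty := penalty + (if cr = "CJ" then x else 0)
    let penalty := penalty + (if cr = "JC" then y else 0)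
    calcPenaltyGo x y c' t penalty

def calcPenalty (x : Int) (y : Int) (mural : List String) : Int :=
  match mural with
  | [] => 0
  | prev :: rest => calcPenaltyGo x y prev rest 0

-- ===== PORT B =====
-- drop '?' entries, pair up survivors, count "CJ" / "JC" occurrences
def calcPenalty_alt (x : Int) (y : Int) (mural : List String) : Int :=
  let kept := mural.filter (fun s => s ≠ "?")
  let pairs := (kept.zip kept.tail).map (fun p => p.1 ++ p.2)
  x * (PySem.List.count pairs "CJ") + y * (PySem.List.count pairs "JC")

-- ===== PRECONDITION & SPEC =====
def Spec_calcPenalty (x : Int) (y : Int) (mural : List String) (out : Int) : Prop := out = calcPenalty_alt x y mural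
instance (x : Int) (y : Int) (mural : List String) (out : Int) : Decidable (Spec_calcPenalty x y mural out) := by unfold Spec_calcPenalty; infer_instance

-- ===== CLAIM (what is proved, stated in full; the proofs are below) =====
def Claim_equal_calcPenalty : Prop := ∀ (x : Int) (y : Int) (mural : List String), Dom_calcPenalty x y mural → Spec_calcPenalty x y mural (calcPenalty x y mural)

-- ===== LEMMAS AND PROOFS =====

-- recursive pair scorer used only as a bridge between the two ports
def scoreR (x y : Int) : List String → Int
  | a :: b :: t => (if a ++ b = "CJ" then x else 0) + (if a ++ b = "JC" then y else 0) + scoreR x y (b :: t)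
  | _ => 0

theorem self_append_ne_two (s t : String) (c d : Char) (ht : t.toList = [c, d])
    (hcd : c ≠ d) : s ++ s ≠ t := by
  intro h
  have hl : s.toList ++ s.toList = [c, d] := by
    rw [← ht]; simpa using congrArg String.toList h
  match hs : s.toList with
  | [] => rw [hs] at hl; exact absurd hl (by simp)
  | [a] =>
    rw [hs] at hl
    simp only [List.cons_append, List.nil_append] at hl
    injection hl with h1 h2
    injection h2 with h3 _
    exact hcd (h1.symm.trans h3)
  | a :: b :: r =>
    rw [hs] at hl
    have := congrArg List.length hl
    simp at this

theorem qmark_append_ne_two (s t : String) (c d : Char) (ht : t.toList = [c, d])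
    (hc : c ≠ '?') : "?" ++ s ≠ t := by
  intro h
  have hl : '?' :: s.toList = [c, d] := by
    rw [← ht]; simpa using congrArg String.toList h
  injection hl with h1 _
  exact hc h1.symm

theorem scoreR_qmark (x y : Int) (l : List String) : scoreR x y ("?" :: l) = scoreR x y l := by
  match l with
  | [] => rfl
  | b :: t =>
    simp only [scoreR]
    rw [if_neg (qmark_append_ne_two b "CJ" 'C' 'J' (by decide) (by decide)), if_neg (qmark_append_ne_two b "JC" 'J' 'C' (by decide) (by decide))]
    ring

theorem go_eq_scoreR (x y : Int) (t : List String) :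
    ∀ (prev : String) (pen : Int),
      calcPenaltyGo x y prev t pen = pen + scoreR x y (prev :: t.filter (fun s => s ≠ "?")) := by
  induction t with
  | nil => intro prev pen; simp [calcPenaltyGo, scoreR]
  | cons c t ih =>
    intro prev pen
    by_cases hc : c = "?"
    · simp only [calcPenaltyGo, hc, if_true]
      rw [if_neg (self_append_ne_two prev "CJ" 'C' 'J' (by decide) (by decide)),
          if_neg (self_append_ne_two prev "JC" 'J' 'C' (by decide) (by decide))]
      rw [ih]
      simp
    · simp only [calcPenaltyGo, if_neg hc]
      rw [ih]
      simp only [List.filter_cons, decide_eq_true_eq]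
      simp only [ne_eq, hc, not_false_iff, if_pos]
      simp only [scoreR]
      ring

theorem count_form_eq_scoreR (x y : Int) (l : List String) :
    x * (PySem.List.count ((l.zip l.tail).map (fun p => p.1 ++ p.2)) "CJ")
      + y * (PySem.List.count ((l.zip l.tail).map (fun p => p.1 ++ p.2)) "JC")
      = scoreR x y l := by
  match l with
  | [] => simp [PySem.List.count, scoreR]
  | [a] => simp [PySem.List.count, scoreR]
  | a :: b :: t =>
    have ih := count_form_eq_scoreR x y (b :: t)
    simp only [List.tail_cons, List.zip_cons_cons, List.map_cons, PySem.List.count,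
      List.count_cons] at *
    simp only [scoreR, ← ih]
    by_cases h1 : a ++ b = "CJ" <;> by_cases h2 : a ++ b = "JC" <;>
      simp [h1, h2, beq_iff_eq] at * <;> ring

-- ===== VERDICT (by name: the statement is the Claim_ definition above) =====
theorem calcPenalty_spec : Claim_equal_calcPenalty := by
  unfold Claim_equal_calcPenalty
  intro x y mural _
  unfold Spec_calcPenalty calcPenalty_alt
  simp only []
  rw [count_form_eq_scoreR]
  cases mural with
  | nil => simp [calcPenalty, scoreR]
  | cons h t =>
    simp only [calcPenalty]
    rw [go_eq_scoreR]
    by_cases hh : h = "?"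
    · simp [hh, scoreR_qmark]
    · simp [hh]
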